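-- pv_equiv track=rewrite | github.com/rcdailey/home-ops | scripts/hass/logs.py | _body_summary
-- ===== SOURCE A (Python) =====
-- def _body_summary(text: str) -> str:
--     """Headline (first line) plus last non-empty line for traceback exceptions."""
--     lines = [ln for ln in text.splitlines() if ln.strip()]
--     if not lines:
--         return text
--     head = lines[0]
--     if len(lines) == 1:
--         return head
--     tail = lines[-1].strip()
--     if tail == head.strip():
--         return head
--     return f"{head}  |  {tail}"
-- ===== SOURCE B (Python) =====
-- def _body_summary(text: str) -> str:
--     """Headline (first line) plus last non-empty line for traceback exceptions."""
--     state = None  # (first non-blank line, last non-blank line seen so far)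
--     for ln in text.splitlines():
--         if ln.strip():
--             state = (ln, ln) if state is None else (state[0], ln)
--     if state is None:
--         return text
--     head, last = state
--     tail = last.strip()
--     if tail == head.strip():
--         return head
--     return f"{head}  |  {tail}"
-- ===== Notes on version B (the rewrite author's own statement) =====
-- stated objective: alternative
-- what changed: B replaces A's filter-then-index (build the list of all non-empty lines, then take lines[0], len check, lines[-1]) by a single forward fold that carries one accumulator pair (first non-blank, last non-blank seen); no filtered list exists, no backward index, and the single-line length check disappears because head==last makes the strip-equality branch fire.
import Mathlib
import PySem

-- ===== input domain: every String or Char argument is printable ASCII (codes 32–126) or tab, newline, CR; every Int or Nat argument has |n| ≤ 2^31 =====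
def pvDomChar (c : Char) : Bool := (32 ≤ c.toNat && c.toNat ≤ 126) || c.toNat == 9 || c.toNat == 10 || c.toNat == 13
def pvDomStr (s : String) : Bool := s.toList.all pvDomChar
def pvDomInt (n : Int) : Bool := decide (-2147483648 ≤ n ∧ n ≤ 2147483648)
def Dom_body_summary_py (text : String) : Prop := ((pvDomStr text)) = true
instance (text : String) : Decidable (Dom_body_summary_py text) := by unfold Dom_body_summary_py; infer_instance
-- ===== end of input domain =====

-- B replaces A's filter-then-index by a single forward fold carrying (first, last) non-blank lines; same cost, different decomposition.

-- ===== PORT A =====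
def body_summary_py (text : String) : String :=
  let lines := (PySem.Str.splitlines text).filter (fun ln => PySem.Str.strip ln != "")
  match lines with
  | [] => text
  | head :: rest =>
    if rest.isEmpty then head
    else
      -- lines[-1]: getLast? is some on this nonempty list, the "" default is never used
      let tail := PySem.Str.strip (((head :: rest).getLast?).getD "")
      if tail == PySem.Str.strip head then head
      else head ++ "  |  " ++ tail

-- ===== PORT B =====
-- the loop body: update the accumulator (first non-blank, last non-blank so far)
def pvStep (st : Option (String × String)) (ln : String) : Option (String × String) :=
  if PySem.Str.strip ln != "" then
    match st with
    | none => some (ln, ln)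
    | some (h, _) => some (h, ln)
  else st

def body_summary_py_alt (text : String) : String :=
  match (PySem.Str.splitlines text).foldl pvStep none with
  | none => text
  | some (head, last) =>
    let tail := PySem.Str.strip last
    if tail == PySem.Str.strip head then head
    else head ++ "  |  " ++ tail

-- ===== PRECONDITION & SPEC =====
def Spec_body_summary_py (text : String) (out : String) : Prop := out = body_summary_py_alt text
instance (text : String) (out : String) : Decidable (Spec_body_summary_py text out) := by unfold Spec_body_summary_py; infer_instance

-- ===== CLAIM (what is proved, stated in full; the proofs are below) =====
def Claim_equal_body_summary_py : Prop := ∀ (text : String), Dom_body_summary_py text → Spec_body_summary_py text (body_summary_py text)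

-- ===== LEMMAS AND PROOFS =====

theorem pv_getD_cons (a x : String) (fl : List String) :
    ((a :: fl).getLast?).getD x = (fl.getLast?).getD a := by
  cases fl with
  | nil => rfl
  | cons b t =>
    obtain ⟨y, hy⟩ : ∃ y, (b :: t).getLast? = some y := ⟨_, List.getLast?_eq_some_getLast (by simp)⟩
    rw [List.getLast?_cons_cons, hy]
    rfl

theorem pv_foldl_some (l : List String) (h x : String) :
    l.foldl pvStep (some (h, x)) =
      some (h, ((l.filter (fun ln => PySem.Str.strip ln != "")).getLast?).getD x) := by
  induction l generalizing x with
  | nil => rfl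
  | cons a l ih =>
    by_cases hp : (PySem.Str.strip a != "") = true
    · rw [List.foldl_cons]
      simp only [List.filter_cons, hp, if_true]
      rw [pv_getD_cons]
      simpa [pvStep, hp] using ih a
    · rw [List.foldl_cons]
      simp only [List.filter_cons, hp]
      simpa [pvStep, hp] using ih x

theorem pv_foldl_none (l : List String) :
    l.foldl pvStep none =
      match l.filter (fun ln => PySem.Str.strip ln != "") with
      | [] => none
      | h :: t => some (h, (((h :: t).getLast?).getD h)) := by
  induction l with
  | nil => rfl
  | cons a l ih =>
    by_cases hp : (PySem.Str.strip a != "") = true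
    · rw [List.foldl_cons]
      simp only [List.filter_cons, hp, if_true]
      simpa [pvStep, hp, pv_getD_cons] using pv_foldl_some l a a
    · rw [List.foldl_cons]
      simp only [List.filter_cons, hp]
      simpa [pvStep, hp] using ih

-- ===== VERDICT (by name: the statement is the Claim_ definition above) =====
theorem body_summary_py_spec : Claim_equal_body_summary_py := by
  intro text _
  unfold Spec_body_summary_py body_summary_py body_summary_py_alt
  rw [pv_foldl_none]
  cases hfl : (PySem.Str.splitlines text).filter (fun ln => PySem.Str.strip ln != "") with
  | nil => simp
  | cons head rest =>
    cases rest with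
    | nil => simp
    | cons b bs =>
      obtain ⟨y, hy⟩ : ∃ y, (head :: b :: bs).getLast? = some y :=
        ⟨_, List.getLast?_eq_some_getLast (by simp)⟩
      simp only [hy, Option.getD_some, List.isEmpty, Bool.false_eq_true, if_false]
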